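-- pv_equiv track=rewrite | github.com/mmercalde/prng_cluster_public | pa_sieve_validation_harness.py | java_lcg_reverse
-- ===== SOURCE A (Python) =====
-- from typing import List, Tuple, Dict
--
-- def java_lcg_reverse(seed: int, n: int, skip: int = 0) -> List[int]:
--     """Generate n values stepping BACKWARD through Java LCG state."""
--     MULTIPLIER     = 0x5DEECE66D
--     ADDEND         = 0xB
--     MASK           = (1 << 48) - 1
--     INV_MULTIPLIER = 0xDFE05BCB1365      # Modular inverse of MULTIPLIER mod 2^48
--     MOD            = 1000
--
--     state = (seed ^ MULTIPLIER) & MASK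
--     out   = []
--     for _ in range(n):
--         for _ in range(skip):
--             state = ((state - ADDEND) * INV_MULTIPLIER) & MASK
--         state = ((state - ADDEND) * INV_MULTIPLIER) & MASK
--         out.append(int(state >> (48 - 31)) % MOD)
--     return out
-- ===== SOURCE B (Python) =====
-- from typing import List
--
-- def java_lcg_reverse(seed: int, n: int, skip: int = 0) -> List[int]:
--     """Generate n values stepping BACKWARD through Java LCG state.
--
--     Instead of performing skip+1 inverse steps per output, compose the
--     (skip+1)-step backward affine map once by binary exponentiation and
--     apply it n times."""
--     MULTIPLIER     = 0x5DEECE66D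
--     ADDEND         = 0xB
--     M              = 1 << 48
--     INV_MULTIPLIER = 0xDFE05BCB1365
--     MOD            = 1000
--
--     # one backward step is the affine map s -> (INV*s - INV*ADDEND) mod M
--     base_a, base_c = INV_MULTIPLIER, (-ADDEND * INV_MULTIPLIER) % M
--     e = skip + 1 if skip > 0 else 1
--     A, C = 1, 0
--     while e:
--         if e & 1:
--             A, C = (base_a * A) % M, (base_a * C + base_c) % M
--         base_a, base_c = (base_a * base_a) % M, (base_a * base_c + base_c) % M
--         e >>= 1
--
--     state = (seed ^ MULTIPLIER) % M
--     out = []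
--     for _ in range(n):
--         state = (A * state + C) % M
--         out.append((state >> 17) % MOD)
--     return out
-- ===== Notes on version B (the rewrite author's own statement) =====
-- stated objective: faster
-- what changed: Instead of performing skip+1 inverse LCG steps per output value, B composes the (skip+1)-step backward affine map mod 2^48 once by binary exponentiation and applies the composed map once per output.
import Mathlib
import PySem

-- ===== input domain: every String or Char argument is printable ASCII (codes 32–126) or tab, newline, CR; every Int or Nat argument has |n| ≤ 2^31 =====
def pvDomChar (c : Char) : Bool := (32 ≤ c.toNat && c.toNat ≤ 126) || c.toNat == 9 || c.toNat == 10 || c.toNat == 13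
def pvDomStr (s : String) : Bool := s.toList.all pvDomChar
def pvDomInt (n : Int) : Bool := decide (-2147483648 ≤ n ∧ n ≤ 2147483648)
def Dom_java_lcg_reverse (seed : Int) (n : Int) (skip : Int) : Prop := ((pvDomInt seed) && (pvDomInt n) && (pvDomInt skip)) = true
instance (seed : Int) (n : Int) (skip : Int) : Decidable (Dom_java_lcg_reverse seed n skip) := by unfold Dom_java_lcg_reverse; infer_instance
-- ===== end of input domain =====

-- B replaces A's skip+1 inverse LCG steps per output with one application of the
-- (skip+1)-step backward affine map mod 2^48, composed once by binary exponentiation (objective: faster).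

-- ===== PORT A =====
-- one backward step: ((state - ADDEND) * INV_MULTIPLIER) & MASK
def pvBackA (state : Int) : Int :=
  PySem.Int.band ((state - 11) * 246154705703781) 281474976710655

def java_lcg_reverse (seed : Int) (n : Int) (skip : Int) : List Int :=
  let state := PySem.Int.band (PySem.Int.bxor seed 25214903917) 281474976710655
  ((List.range n.toNat).foldl (fun (p : Int × List Int) _ =>
      let s1 := (List.range skip.toNat).foldl (fun s _ => pvBackA s) p.1
      let s2 := pvBackA s1
      (s2, p.2 ++ [PySem.Int.mod (s2 >>> (48 - 31 : Nat)) 1000])) (state, [])).2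

-- ===== PORT B =====
-- Python's '% M' with the positive literal M = 2^48 is exactly Int.emod here.
def pvM : Int := 281474976710656

-- the body of B's 'if e & 1' update: compose base after acc
def pvAffMul (b acc : Int × Int) : Int × Int :=
  ((b.1 * acc.1) % pvM, (b.1 * acc.2 + b.2) % pvM)

-- B's 'while e' binary-exponentiation loop
def pvPowLoop (e : Nat) (b acc : Int × Int) : Int × Int :=
  if e = 0 then acc
  else pvPowLoop (e / 2) ((b.1 * b.1) % pvM, (b.1 * b.2 + b.2) % pvM)
        (if e % 2 = 1 then pvAffMul b acc else acc)
  termination_by e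
  decreasing_by exact Nat.div_lt_self (by omega) (by omega)

def java_lcg_reverse_alt (seed : Int) (n : Int) (skip : Int) : List Int :=
  let e : Nat := (if skip > 0 then skip + 1 else 1).toNat
  let p := pvPowLoop e (246154705703781, (-11 * 246154705703781) % pvM) (1, 0)
  let state := (PySem.Int.bxor seed 25214903917) % pvM
  ((List.range n.toNat).foldl (fun (q : Int × List Int) _ =>
      let s := (p.1 * q.1 + p.2) % pvM
      (s, q.2 ++ [PySem.Int.mod (s >>> (17 : Nat)) 1000])) (state, [])).2

-- ===== PRECONDITION & SPEC =====
def Spec_java_lcg_reverse (seed : Int) (n : Int) (skip : Int) (out : List Int) : Prop := out = java_lcg_reverse_alt seed n skip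
instance (seed : Int) (n : Int) (skip : Int) (out : List Int) : Decidable (Spec_java_lcg_reverse seed n skip out) := by unfold Spec_java_lcg_reverse; infer_instance

-- ===== CLAIM (what is proved, stated in full; the proofs are below) =====
def Claim_equal_java_lcg_reverse : Prop := ∀ (seed : Int) (n : Int) (skip : Int), Dom_java_lcg_reverse seed n skip → Spec_java_lcg_reverse seed n skip (java_lcg_reverse seed n skip)

-- ===== LEMMAS AND PROOFS =====

-- Python's x & (2^48-1) on any Int (also negative x) is x mod 2^48
theorem pv_band_mask (x : Int) :
    PySem.Int.band x 281474976710655 = x % pvM := by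
  unfold PySem.Int.band pvM
  by_cases hx : 0 ≤ x
  · rw [if_pos hx, if_pos (show (0:Int) ≤ 281474976710655 by norm_num)]
    have ht : (281474976710655 : Int).toNat = 281474976710655 := rfl
    rw [ht, show (281474976710655:Nat) = 2^48-1 by norm_num, Nat.and_two_pow_sub_one_eq_mod]
    have h2 : x.toNat % 2^48 = x.toNat % 281474976710656 := by norm_num
    rw [h2]; omega
  · rw [if_neg hx, if_pos (show (0:Int) ≤ 281474976710655 by norm_num)]
    have ht : (281474976710655 : Int).toNat = 281474976710655 := rfl
    rw [ht, show (281474976710655:Nat) = 2^48-1 by norm_num, Nat.and_comm,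
        Nat.and_two_pow_sub_one_eq_mod]
    have h2 : (-x-1).toNat % 2^48 = (-x-1).toNat % 281474976710656 := by norm_num
    rw [h2]; omega

-- an affine map mod pvM, and the base backward-step map shared by both proofs
def pvApply (p : Int × Int) (s : Int) : Int := (p.1 * s + p.2) % pvM

def pvF : Int → Int := pvApply (246154705703781, (-11 * 246154705703781) % pvM)

-- composing two affine maps mod pvM
theorem pv_apply_mul (b acc : Int × Int) (s : Int) :
    pvApply (pvAffMul b acc) s = pvApply b (pvApply acc s) := by
  obtain ⟨a1, c1⟩ := b; obtain ⟨a2, c2⟩ := acc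
  show ((a1*a2 % pvM)*s + (a1*c2+c1) % pvM) % pvM = (a1*((a2*s+c2) % pvM)+c1) % pvM
  have h1 : ((a1*a2 % pvM)*s + (a1*c2+c1) % pvM) % pvM = (a1*a2*s + (a1*c2+c1)) % pvM := by
    rw [Int.add_emod, Int.mul_emod, Int.emod_emod_of_dvd _ dvd_rfl, ← Int.mul_emod,
        Int.emod_emod_of_dvd _ dvd_rfl, ← Int.add_emod]
  have h2 : (a1*((a2*s+c2) % pvM)+c1) % pvM = (a1*(a2*s+c2)+c1) % pvM := by
    rw [Int.add_emod, Int.mul_emod, Int.emod_emod_of_dvd _ dvd_rfl, ← Int.mul_emod, ← Int.add_emod]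
  rw [h1, h2]; ring_nf

-- (f ∘ f)^[k] = f^[2k], pointwise
theorem pv_iter_two {α : Type} (f : α → α) (k : Nat) : ∀ x, (f ∘ f)^[k] x = f^[2*k] x := by
  induction k with
  | zero => intro x; simp
  | succ k ih =>
    intro x
    rw [Function.iterate_succ_apply, Function.comp_apply, ih,
        show 2*(k+1) = 2*k+1+1 from by omega,
        Function.iterate_succ_apply, Function.iterate_succ_apply]

-- B's binary-exponentiation loop computes the e-fold iterate of the base map
theorem pv_powLoop_iterate (e : Nat) : ∀ (b acc : Int × Int) (s : Int),
    pvApply (pvPowLoop e b acc) s = (pvApply b)^[e] (pvApply acc s) := by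
  induction e using Nat.strong_induction_on with
  | _ e ih =>
    intro b acc s
    rw [pvPowLoop]
    by_cases he : e = 0
    · simp [he]
    · simp only [he, if_false]
      rw [ih (e / 2) (Nat.div_lt_self (by omega) (by omega))]
      have hsq : pvApply ((b.1 * b.1) % pvM, (b.1 * b.2 + b.2) % pvM)
          = pvApply b ∘ pvApply b := by
        funext t
        simpa [pvAffMul] using pv_apply_mul b b t
      by_cases ho : e % 2 = 1
      · rw [if_pos ho, pv_apply_mul, hsq, pv_iter_two,
            ← Function.iterate_succ_apply]
        congr 1; omega
      · rw [if_neg ho, hsq, pv_iter_two]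
        congr 1; omega

-- an index-ignoring foldl over range is iteration
theorem pv_foldl_iterate (g : Int → Int) (k : Nat) : ∀ (s : Int),
    (List.range k).foldl (fun s _ => g s) s = g^[k] s := by
  induction k with
  | zero => intro s; simp
  | succ k ih =>
    intro s
    rw [List.range_succ, List.foldl_append, ih, Function.iterate_succ_apply']
    rfl

-- A's backward step IS the base affine map
theorem pv_backA_eq : pvBackA = pvF := by
  funext s
  unfold pvBackA pvF pvApply
  rw [pv_band_mask]
  have h2 : (246154705703781 * s + (-11 * 246154705703781) % pvM) % pvM
      = (246154705703781 * s + -11 * 246154705703781) % pvM := by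
    rw [Int.add_emod, Int.emod_emod_of_dvd _ dvd_rfl, ← Int.add_emod]
  rw [h2]; ring_nf

-- the base map absorbs an initial reduction mod pvM
theorem pv_apply_emod (p : Int × Int) (s : Int) :
    pvApply p (s % pvM) = pvApply p s := by
  unfold pvApply
  rw [Int.add_emod, Int.mul_emod, Int.emod_emod_of_dvd _ dvd_rfl, ← Int.mul_emod, ← Int.add_emod]

-- per-output state updates of A and B agree, for every state
theorem pv_step_eq (skip : Int) (s : Int) :
    pvBackA ((List.range skip.toNat).foldl (fun s _ => pvBackA s) s)
      = (let e : Nat := (if skip > 0 then skip + 1 else 1).toNat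
         let p := pvPowLoop e (246154705703781, (-11 * 246154705703781) % pvM) (1, 0)
         (p.1 * s + p.2) % pvM) := by
  have he : (if skip > 0 then skip + 1 else 1).toNat = skip.toNat + 1 := by
    split <;> omega
  rw [pv_backA_eq, pv_foldl_iterate]
  rw [show pvF (pvF^[skip.toNat] s) = pvF^[skip.toNat + 1] s from
    (Function.iterate_succ_apply' pvF skip.toNat s).symm]
  show pvF^[skip.toNat + 1] s
      = pvApply (pvPowLoop (if skip > 0 then skip + 1 else 1).toNat
          (246154705703781, (-11 * 246154705703781) % pvM) (1, 0)) s
  rw [pv_powLoop_iterate, he]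
  show pvF^[skip.toNat + 1] s = pvF^[skip.toNat + 1] (pvApply (1, 0) s)
  have h10 : pvApply (1, 0) s = s % pvM := by simp [pvApply]
  rw [h10, Function.iterate_succ_apply, Function.iterate_succ_apply]
  congr 1
  exact (pv_apply_emod _ s).symm

-- ===== VERDICT (by name: the statement is the Claim_ definition above) =====
theorem java_lcg_reverse_spec : Claim_equal_java_lcg_reverse := by
  intro seed n skip _
  unfold Spec_java_lcg_reverse java_lcg_reverse java_lcg_reverse_alt
  simp only []
  rw [pv_band_mask]
  have hbody : (fun (p : Int × List Int) (_ : Nat) =>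
        (pvBackA ((List.range skip.toNat).foldl (fun s _ => pvBackA s) p.1),
         p.2 ++ [PySem.Int.mod
            (pvBackA ((List.range skip.toNat).foldl (fun s _ => pvBackA s) p.1) >>> (48 - 31 : Nat)) 1000]))
      = (fun (q : Int × List Int) (_ : Nat) =>
        (((pvPowLoop (if skip > 0 then skip + 1 else 1).toNat
              (246154705703781, (-11 * 246154705703781) % pvM) (1, 0)).1 * q.1 +
            (pvPowLoop (if skip > 0 then skip + 1 else 1).toNat
              (246154705703781, (-11 * 246154705703781) % pvM) (1, 0)).2) % pvM,
         q.2 ++ [PySem.Int.mod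
            ((((pvPowLoop (if skip > 0 then skip + 1 else 1).toNat
              (246154705703781, (-11 * 246154705703781) % pvM) (1, 0)).1 * q.1 +
            (pvPowLoop (if skip > 0 then skip + 1 else 1).toNat
              (246154705703781, (-11 * 246154705703781) % pvM) (1, 0)).2) % pvM) >>> (17 : Nat)) 1000])) := by
    funext q i
    have h := pv_step_eq skip q.1
    simp only [] at h
    rw [h]
  rw [hbody]
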